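-- pv_equiv track=rewrite | github.com/adfio1234/Algorithms | SWEA/D3/1873. 상호의 배틀필드/상호의 배틀필드.py | tankShoot
-- ===== SOURCE A (Python) =====
-- def tankShoot(tankDirection,mapArr,tankPointX,tankPointY):
--     if tankDirection==1:
--         for i in range(tankPointX,-1,-1):
--             if mapArr[tankPointY][i]=='*':
--                 mapArr[tankPointY][i]='.'
--                 break
--             elif mapArr[tankPointY][i]=='#':
--                 break
--     elif tankDirection==2:
--         for i in range(tankPointX,len(mapArr[0])):
--             if mapArr[tankPointY][i]=='*':
--                 mapArr[tankPointY][i]='.'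
--                 break
--             elif mapArr[tankPointY][i]=='#':
--                 break
--     elif tankDirection==3:
--         for i in range(tankPointY,-1,-1):
--             if mapArr[i][tankPointX]=='*':
--                 mapArr[i][tankPointX]='.'
--                 break
--             elif mapArr[i][tankPointX]=='#':
--                 break
--     elif tankDirection==4:
--         for i in range(tankPointY,len(mapArr)):
--             if mapArr[i][tankPointX]=='*':
--                 mapArr[i][tankPointX]='.'
--                 break
--             elif mapArr[i][tankPointX]=='#':
--                 break
--     return mapArr
-- ===== SOURCE B (Python) =====
-- def tankShoot(tankDirection, mapArr, tankPointX, tankPointY):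
--     if tankDirection not in (1, 2, 3, 4):
--         return mapArr
--     vertical = tankDirection in (3, 4)
--     back = tankDirection in (1, 3)
--     line = [row[tankPointX] for row in mapArr] if vertical else mapArr[tankPointY]
--     pos = tankPointY if vertical else tankPointX
--     path = line[:pos + 1][::-1] if back else line[pos:]
--     hits = [i for i, c in enumerate(path) if c in ('*', '#')]
--     if hits and path[hits[0]] == '*':
--         idx = pos - hits[0] if back else pos + hits[0]
--         if vertical:
--             mapArr[idx][tankPointX] = '.'
--         else:
--             mapArr[tankPointY][idx] = '.'
--     return mapArr
-- ===== Notes on version B (the rewrite author's own statement) =====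
-- stated objective: alternative
-- what changed: Replaces A's four direction-specific mutate-as-you-scan break loops by a staged functional pipeline: materialize the ray as a list (row slice or column extraction), collect all obstacle indices with one enumerate pass, then perform at most a single point-write from the first hit.
-- outside the precondition, e.g. on tankShoot(2, [['*', '.']], -1, 0): A returns [['.', '.']], B returns [['*', '.']]; on tankShoot(1, [['.']], 1, 0): A raises IndexError, B returns [['.']]
import Mathlib
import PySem

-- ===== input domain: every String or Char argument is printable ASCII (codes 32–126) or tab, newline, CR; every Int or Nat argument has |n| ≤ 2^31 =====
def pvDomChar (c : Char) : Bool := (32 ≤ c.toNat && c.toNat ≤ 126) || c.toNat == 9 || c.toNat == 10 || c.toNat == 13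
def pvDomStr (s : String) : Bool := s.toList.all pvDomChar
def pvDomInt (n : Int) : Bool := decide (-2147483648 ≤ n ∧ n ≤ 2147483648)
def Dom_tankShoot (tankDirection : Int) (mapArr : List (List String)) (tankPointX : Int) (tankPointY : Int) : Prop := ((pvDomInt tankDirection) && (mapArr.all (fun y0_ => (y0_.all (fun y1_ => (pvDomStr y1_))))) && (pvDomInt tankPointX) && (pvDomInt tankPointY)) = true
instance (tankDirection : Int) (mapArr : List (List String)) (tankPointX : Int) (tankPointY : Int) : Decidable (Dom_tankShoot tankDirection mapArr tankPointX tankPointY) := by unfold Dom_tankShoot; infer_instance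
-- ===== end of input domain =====

-- B replaces A's four mutate-as-you-scan break loops by a staged pipeline: materialize the ray as a
-- list, collect the obstacle indices in one enumerate pass, then do at most one point-write
-- (objective: alternative). A mutates mapArr in place; the equivalence proved here is about the
-- RETURN value only (B performs the same single in-place cell assignment in Python).

-- ===== PORT A =====
-- mapArr[r][c] (Python indexing, negative wraps; none = IndexError)
def pvGetCell (m : List (List String)) (r c : Int) : Option String :=
  match PySem.List.pyGet? m r with
  | none => none
  | some row => PySem.List.pyGet? row c

-- mapArr[r][c] = v (total form; Pre_ keeps indices in range)
def pvSetCell (m : List (List String)) (r c : Int) (v : String) : List (List String) :=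
  PySem.List.pySetD m r (PySem.List.pySetD (PySem.List.pyGetD m r []) c v)

-- the for-loop body of A's horizontal branches (dir 1 and 2), with break as early return
def pvScanRow (m : List (List String)) (y : Int) : List Int → List (List String)
  | [] => m
  | i :: rest =>
    match pvGetCell m y i with
    | none => m   -- IndexError in Python; excluded by Pre_
    | some c =>
      if c = "*" then pvSetCell m y i "."
      else if c = "#" then m
      else pvScanRow m y rest

-- the for-loop body of A's vertical branches (dir 3 and 4)
def pvScanCol (m : List (List String)) (x : Int) : List Int → List (List String)
  | [] => m
  | i :: rest =>
    match pvGetCell m i x with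
    | none => m   -- IndexError in Python; excluded by Pre_
    | some c =>
      if c = "*" then pvSetCell m i x "."
      else if c = "#" then m
      else pvScanCol m x rest

def tankShoot (tankDirection : Int) (mapArr : List (List String)) (tankPointX : Int) (tankPointY : Int) : List (List String) :=
  if tankDirection = 1 then
    pvScanRow mapArr tankPointY (PySem.List.pyRange tankPointX (-1) (-1))
  else if tankDirection = 2 then
    pvScanRow mapArr tankPointY (PySem.List.pyRange tankPointX ((mapArr.headD []).length : Int) 1)
  else if tankDirection = 3 then
    pvScanCol mapArr tankPointX (PySem.List.pyRange tankPointY (-1) (-1))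
  else if tankDirection = 4 then
    pvScanCol mapArr tankPointX (PySem.List.pyRange tankPointY (mapArr.length : Int) 1)
  else mapArr

-- ===== PORT B =====
-- c in ('*', '#')
def pvHit (c : String) : Bool := c == "*" || c == "#"

-- [i for i, c in enumerate(path) if c in ('*', '#')]
def pvHitIdxs (path : List String) : List Int :=
  ((PySem.List.enumerate path 0).filter (fun p => pvHit p.2)).map Prod.fst

def tankShoot_alt (tankDirection : Int) (mapArr : List (List String)) (tankPointX : Int) (tankPointY : Int) : List (List String) :=
  if ¬ (tankDirection = 1 ∨ tankDirection = 2 ∨ tankDirection = 3 ∨ tankDirection = 4) then mapArr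
  else
    let vertical : Bool := tankDirection == 3 || tankDirection == 4
    let back : Bool := tankDirection == 1 || tankDirection == 3
    -- [row[tankPointX] for row in mapArr]  (row[tankPointX]: IndexError excluded by Pre_) / mapArr[tankPointY]
    let line : List String :=
      if vertical then mapArr.map (fun row => PySem.List.pyGetD row tankPointX "")
      else PySem.List.pyGetD mapArr tankPointY []
    let pos : Int := if vertical then tankPointY else tankPointX
    -- line[:pos+1][::-1] / line[pos:]  ([::-1] is list reversal: PySem.List.slice?_none_none_neg_one)
    let path : List String :=
      if back then (PySem.List.slice line none (some (pos + 1))).reverse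
      else PySem.List.slice line (some pos) none
    match pvHitIdxs path with
    | [] => mapArr
    | j :: _ =>
      if PySem.List.pyGetD path j "" == "*" then
        let idx : Int := if back then pos - j else pos + j
        if vertical then
          PySem.List.pySetD mapArr idx (PySem.List.pySetD (PySem.List.pyGetD mapArr idx []) tankPointX ".")
        else
          PySem.List.pySetD mapArr tankPointY (PySem.List.pySetD (PySem.List.pyGetD mapArr tankPointY []) idx ".")
      else mapArr

-- ===== PRECONDITION & SPEC =====
-- For directions 1–4, Pre_ restricts to the task's natural domain: a rectangular grid with the tank
-- inside it. Outside it A raises IndexError (tank beyond the row/grid) or silently scans via Python's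
-- negative-index wraparound (tank at negative coordinates), an accident of A's unchecked indexing.
def Pre_tankShoot (tankDirection : Int) (mapArr : List (List String)) (tankPointX : Int) (tankPointY : Int) : Prop :=
  (tankDirection = 1 ∨ tankDirection = 2 ∨ tankDirection = 3 ∨ tankDirection = 4) →
    (0 ≤ tankPointY ∧ tankPointY < (mapArr.length : Int) ∧
     0 ≤ tankPointX ∧ tankPointX < ((mapArr.headD []).length : Int) ∧
     ∀ r ∈ mapArr, r.length = (mapArr.headD []).length)
instance (tankDirection : Int) (mapArr : List (List String)) (tankPointX : Int) (tankPointY : Int) : Decidable (Pre_tankShoot tankDirection mapArr tankPointX tankPointY) := by unfold Pre_tankShoot; infer_instance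

def pvWitness_tankShoot : Int × List (List String) × Int × Int := (2, [[".", "*", "#"], [".", ".", "."]], 0, 0)

def Spec_tankShoot (tankDirection : Int) (mapArr : List (List String)) (tankPointX : Int) (tankPointY : Int) (out : List (List String)) : Prop := out = tankShoot_alt tankDirection mapArr tankPointX tankPointY
instance (tankDirection : Int) (mapArr : List (List String)) (tankPointX : Int) (tankPointY : Int) (out : List (List String)) : Decidable (Spec_tankShoot tankDirection mapArr tankPointX tankPointY out) := by unfold Spec_tankShoot; infer_instance

-- ===== CLAIM (what is proved, stated in full; the proofs are below) =====
def Claim_equal_tankShoot : Prop := ∀ (tankDirection : Int) (mapArr : List (List String)) (tankPointX : Int) (tankPointY : Int), Dom_tankShoot tankDirection mapArr tankPointX tankPointY → Pre_tankShoot tankDirection mapArr tankPointX tankPointY → Spec_tankShoot tankDirection mapArr tankPointX tankPointY (tankShoot tankDirection mapArr tankPointX tankPointY)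

-- ===== LEMMAS AND PROOFS =====

-- pvHitIdxs generalized to an arbitrary enumerate start (proof helper)
def pvHitsFrom (s : Int) (t : List String) : List Int :=
  ((PySem.List.enumerate t s).filter (fun p => pvHit p.2)).map Prod.fst

-- B's "first hit then one write", as a reusable expression: base + sign*j is the grid index of hit j
def pvResolve (m : List (List String)) (wr : Int → List (List String)) (base sign : Int) (path : List String) : List (List String) :=
  match pvHitsFrom 0 path with
  | [] => m
  | j :: _ => if PySem.List.pyGetD path j "" == "*" then wr (base + sign * j) else m

lemma pvHitIdxs_eq (t : List String) : pvHitIdxs t = pvHitsFrom 0 t := rfl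

lemma pvHitsFrom_nil (s : Int) : pvHitsFrom s [] = [] := rfl

lemma pvHitsFrom_cons (s : Int) (c : String) (t : List String) :
    pvHitsFrom s (c :: t) = if pvHit c then s :: pvHitsFrom (s+1) t else pvHitsFrom (s+1) t := by
  unfold pvHitsFrom
  rw [PySem.List.enumerate_cons]
  by_cases h : pvHit c <;> simp [h]

lemma pvHitsFrom_shift (t : List String) : ∀ s : Int, pvHitsFrom s t = (pvHitsFrom 0 t).map (fun j => s + j) := by
  induction t with
  | nil => intro s; simp [pvHitsFrom_nil]
  | cons c t ih =>
    intro s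
    rw [pvHitsFrom_cons, pvHitsFrom_cons, ih (s+1),
        show (0:Int)+1 = 1 from by norm_num, ih 1]
    by_cases h : pvHit c <;> simp [h, List.map_map, Function.comp_def, add_assoc]

lemma pvHitsFrom_le (t : List String) : ∀ (s j : Int), j ∈ pvHitsFrom s t → s ≤ j := by
  induction t with
  | nil => intro s j h; simp [pvHitsFrom_nil] at h
  | cons c t ih =>
    intro s j h
    rw [pvHitsFrom_cons] at h
    by_cases hc : pvHit c
    · rw [if_pos hc] at h
      rcases List.mem_cons.mp h with h | h
      · omega
      · have := ih (s+1) j h; omega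
    · rw [if_neg hc] at h; have := ih (s+1) j h; omega

lemma pvHitsFrom_zero_cons (c : String) (t : List String) :
    pvHitsFrom 0 (c :: t) =
      if pvHit c then 0 :: (pvHitsFrom 0 t).map (fun j => 1 + j) else (pvHitsFrom 0 t).map (fun j => 1 + j) := by
  rw [pvHitsFrom_cons]
  norm_num [pvHitsFrom_shift t 1]

-- mapArr[r][c] under in-range nonneg indices
lemma pv_getCell_eq (m : List (List String)) (y x : Int)
    (hy0 : 0 ≤ y) (hy1 : y < (m.length : Int))
    (hx0 : 0 ≤ x) (hx1 : x < ((m[y.toNat]?.getD []).length : Int)) :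
    pvGetCell m y x = some ((m[y.toNat]?.getD [])[x.toNat]?.getD "") := by
  have hyn : y.toNat < m.length := by omega
  have h1 : PySem.List.pyGet? m y = some (m[y.toNat]?.getD []) := by
    rw [PySem.List.pyGet?_of_nonneg m hy0]
    simp [List.getElem?_eq_getElem hyn]
  have hxn : x.toNat < (m[y.toNat]?.getD []).length := by omega
  simp only [pvGetCell, h1]
  rw [PySem.List.pyGet?_of_nonneg _ hx0]
  simp [List.getElem?_eq_getElem hxn]

-- A's scan over range(x, len(ln)) computes B's first-hit resolution on ln[x:]
lemma pv_scan_fwd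
    (m : List (List String)) (ln : List String)
    (get : Int → Option String) (wr : Int → List (List String))
    (scan : List Int → List (List String))
    (hnil : scan [] = m)
    (hcons : ∀ i rest, scan (i :: rest) =
        match get i with
        | none => m
        | some c => if c = "*" then wr i else if c = "#" then m else scan rest)
    (hget : ∀ i : Int, 0 ≤ i → i < (ln.length : Int) → get i = some (ln.getD i.toNat ""))
    : ∀ (n x : Nat), ln.length - x ≤ n →
      scan (PySem.List.pyRange (x : Int) (ln.length : Int) 1) =
        pvResolve m wr (x : Int) 1 (ln.drop x) := by
  intro n
  induction n with
  | zero =>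
    intro x h
    have hx : ln.length ≤ x := by omega
    rw [PySem.List.pyRange_one_eq_nil (by exact_mod_cast hx), hnil,
        List.drop_eq_nil_of_le hx]
    simp [pvResolve, pvHitsFrom_nil]
  | succ n ih =>
    intro x h
    by_cases hx : x < ln.length
    · have hcast : (x : Int) < (ln.length : Int) := by exact_mod_cast hx
      rw [PySem.List.pyRange_one_cons hcast, hcons]
      have hgx := hget (x : Int) (by positivity) hcast
      rw [Int.toNat_natCast] at hgx
      rw [hgx]
      have hdrop : ln.drop x = ln[x] :: ln.drop (x+1) := List.drop_eq_getElem_cons hx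
      have hc : ln.getD x "" = ln[x] := List.getD_eq_getElem _ _ hx
      rw [hc, hdrop]
      dsimp only
      by_cases hstar : ln[x] = "*"
      · rw [if_pos hstar]
        simp [pvResolve, pvHitsFrom_zero_cons, pvHit, hstar,
              PySem.List.pyGetD_of_nonneg _ _ (le_refl (0:Int))]
      · rw [if_neg hstar]
        by_cases hwall : ln[x] = "#"
        · rw [if_pos hwall]
          simp [pvResolve, pvHitsFrom_zero_cons, pvHit, hwall,
                PySem.List.pyGetD_of_nonneg _ _ (le_refl (0:Int))]
        · rw [if_neg hwall]
          have hx1 : ((x:Int) + 1) = ((x+1 : Nat) : Int) := by push_cast; ring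
          rw [hx1, ih (x+1) (by omega)]
          have hnohit : pvHit (ln[x]) = false := by simp [pvHit, hstar, hwall]
          unfold pvResolve
          rw [pvHitsFrom_zero_cons, hnohit]
          simp only [Bool.false_eq_true, if_false]
          cases hrest : pvHitsFrom 0 (ln.drop (x+1)) with
          | nil => simp
          | cons j tl =>
            have hj : 0 ≤ j := pvHitsFrom_le _ 0 j (by rw [hrest]; exact List.mem_cons_self)
            simp only [List.map_cons]
            have hidx : PySem.List.pyGetD (ln[x] :: ln.drop (x+1)) (1 + j) "" =
                PySem.List.pyGetD (ln.drop (x+1)) j "" := by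
              rw [PySem.List.pyGetD_of_nonneg _ _ (by omega : (0:Int) ≤ 1 + j),
                  PySem.List.pyGetD_of_nonneg _ _ hj]
              have : (1 + j).toNat = j.toNat + 1 := by omega
              rw [this]
              simp only [List.getD]
              have h2 : x + (j.toNat + 1) = x + 1 + j.toNat := by omega
              simp [h2]
            rw [hidx]
            have harg : (x : Int) + 1 * (1 + j) = ((x+1 : Nat) : Int) + 1 * j := by push_cast; ring
            rw [harg]
    · have hx' : ln.length ≤ x := by omega
      rw [PySem.List.pyRange_one_eq_nil (by exact_mod_cast hx'), hnil,
          List.drop_eq_nil_of_le hx']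
      simp [pvResolve, pvHitsFrom_nil]

-- range(x, -1, -1) is range(0, x+1) reflected through i ↦ x - i
lemma pv_range_down (x : Nat) :
    (PySem.List.pyRange 0 ((x:Int) + 1) 1).map (fun i => (x:Int) - i) = PySem.List.pyRange (x:Int) (-1) (-1) := by
  rw [PySem.List.pyRange_one, PySem.List.pyRange_neg_one]
  have h1 : (((x:Int) + 1) - 0).toNat = x + 1 := by omega
  have h2 : ((x:Int) - (-1)).toNat = x + 1 := by omega
  rw [h1, h2, List.map_map]
  exact List.map_congr_left (fun k _ => by simp)

-- the reversed prefix ln[:x+1][::-1], element-wise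
lemma pv_revtake_get (ln : List String) (x : Nat) (hx : x < ln.length) :
    ∀ i : Nat, i < x + 1 → ((ln.take (x+1)).reverse).getD i "" = ln.getD (x - i) "" := by
  intro i hi
  have hlen : (ln.take (x+1)).length = x + 1 := by
    simp [List.length_take]; omega
  have hi' : i < (ln.take (x+1)).reverse.length := by simp [hlen]; omega
  rw [List.getD_eq_getElem _ _ hi', List.getElem_reverse]
  have hxi : x - i < ln.length := by omega
  rw [List.getD_eq_getElem _ _ hxi]
  have : (ln.take (x+1)).length - 1 - i = x - i := by omega
  simp only [this]
  exact List.getElem_take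

-- A's scan over range(x, -1, -1) computes B's first-hit resolution on ln[:x+1][::-1]
lemma pv_scan_bwd
    (m : List (List String)) (ln : List String)
    (get : Int → Option String) (wr : Int → List (List String))
    (scan : List Int → List (List String))
    (hnil : scan [] = m)
    (hcons : ∀ i rest, scan (i :: rest) =
        match get i with
        | none => m
        | some c => if c = "*" then wr i else if c = "#" then m else scan rest)
    (hget : ∀ i : Int, 0 ≤ i → i < (ln.length : Int) → get i = some (ln.getD i.toNat ""))
    : ∀ (x : Nat), x < ln.length →
      scan (PySem.List.pyRange (x : Int) (-1) (-1)) =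
        pvResolve m wr (x : Int) (-1) ((ln.take (x+1)).reverse) := by
  intro x hx
  set ln2 : List String := (ln.take (x+1)).reverse with hline'
  have hlen' : ln2.length = x + 1 := by
    simp [hline', List.length_take]; omega
  -- instantiate the forward lemma on the reflected data
  have main := pv_scan_fwd m ln2
      (fun i => get ((x:Int) - i)) (fun i => wr ((x:Int) - i))
      (fun is => scan (is.map (fun i => (x:Int) - i)))
      (by simpa using hnil)
      (by intro i rest; show scan (List.map _ (i :: rest)) = _; rw [List.map_cons, hcons])
      (by
        intro i hi0 hi1
        rw [hlen'] at hi1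
        have hixn : i.toNat < x + 1 := by omega
        have h1 : ((x:Int) - i) = ((x - i.toNat : Nat) : Int) := by omega
        show get ((x:Int) - i) = _
        rw [h1, hget _ (by omega) (by exact_mod_cast (by omega : x - i.toNat < ln.length))]
        rw [Int.toNat_natCast]
        rw [pv_revtake_get ln x hx i.toNat hixn])
      (x + 1) 0 (by omega)
  simp only [Nat.cast_zero, List.drop_zero] at main
  rw [hlen'] at main
  have hr : (PySem.List.pyRange (0:Int) ((x+1 : Nat) : Int) 1).map (fun i => (x:Int) - i) =
      PySem.List.pyRange (x:Int) (-1) (-1) := by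
    have := pv_range_down x
    rw [show ((x:Int) + 1) = ((x+1 : Nat) : Int) by push_cast; ring] at this
    exact this
  rw [hr] at main
  rw [main]
  unfold pvResolve
  cases hh : pvHitsFrom 0 ln2 with
  | nil => rfl
  | cons j tl =>
    have harg : (x:Int) - (0 + 1 * j) = (x:Int) + (-1) * j := by ring
    simp only [harg]

-- row tankPointY as a list, and its width
lemma pv_line_row (m : List (List String)) (y : Int)
    (hy0 : 0 ≤ y) (hy1 : y < (m.length : Int)) :
    PySem.List.pyGetD m y [] = m[y.toNat]'(by omega) := by
  rw [PySem.List.pyGetD_of_nonneg _ _ hy0]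
  exact List.getD_eq_getElem _ _ (by omega)

lemma pv_row_len (m : List (List String)) (y : Int) (w : Nat)
    (hy0 : 0 ≤ y) (hy1 : y < (m.length : Int))
    (hrect : ∀ r ∈ m, r.length = w) : (PySem.List.pyGetD m y []).length = w := by
  rw [pv_line_row m y hy0 hy1]
  exact hrect _ (List.getElem_mem (by omega))

-- B's term for each direction, reduced to pvResolve
lemma pv_alt_1 (m : List (List String)) (x y : Int) (hx0 : 0 ≤ x) :
    tankShoot_alt 1 m x y =
      pvResolve m (fun i => pvSetCell m y i ".") x (-1)
        (((PySem.List.pyGetD m y []).take (x.toNat + 1)).reverse) := by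
  unfold tankShoot_alt
  norm_num
  rw [PySem.List.slice_to _ (by omega : (0:Int) ≤ x + 1)]
  rw [show (x + 1).toNat = x.toNat + 1 by omega]
  unfold pvResolve pvSetCell
  rw [pvHitIdxs_eq]
  cases pvHitsFrom 0 (((PySem.List.pyGetD m y []).take (x.toNat + 1)).reverse) with
  | nil => rfl
  | cons j tl => simp [sub_eq_add_neg]

lemma pv_alt_2 (m : List (List String)) (x y : Int) (hx0 : 0 ≤ x) :
    tankShoot_alt 2 m x y =
      pvResolve m (fun i => pvSetCell m y i ".") x 1
        ((PySem.List.pyGetD m y []).drop x.toNat) := by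
  unfold tankShoot_alt
  norm_num
  rw [PySem.List.slice_from _ hx0]
  unfold pvResolve pvSetCell
  rw [pvHitIdxs_eq]
  cases pvHitsFrom 0 ((PySem.List.pyGetD m y []).drop x.toNat) with
  | nil => rfl
  | cons j tl => simp

lemma pv_alt_3 (m : List (List String)) (x y : Int) (hy0 : 0 ≤ y) :
    tankShoot_alt 3 m x y =
      pvResolve m (fun i => pvSetCell m i x ".") y (-1)
        (((m.map (fun row => PySem.List.pyGetD row x "")).take (y.toNat + 1)).reverse) := by
  unfold tankShoot_alt
  norm_num
  rw [PySem.List.slice_to _ (by omega : (0:Int) ≤ y + 1)]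
  rw [show (y + 1).toNat = y.toNat + 1 by omega]
  unfold pvResolve pvSetCell
  rw [pvHitIdxs_eq]
  cases pvHitsFrom 0 (((m.map (fun row => PySem.List.pyGetD row x "")).take (y.toNat + 1)).reverse) with
  | nil => rfl
  | cons j tl => simp [sub_eq_add_neg]

lemma pv_alt_4 (m : List (List String)) (x y : Int) (hy0 : 0 ≤ y) :
    tankShoot_alt 4 m x y =
      pvResolve m (fun i => pvSetCell m i x ".") y 1
        ((m.map (fun row => PySem.List.pyGetD row x "")).drop y.toNat) := by
  unfold tankShoot_alt
  norm_num
  rw [PySem.List.slice_from _ hy0]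
  unfold pvResolve pvSetCell
  rw [pvHitIdxs_eq]
  cases pvHitsFrom 0 ((m.map (fun row => PySem.List.pyGetD row x "")).drop y.toNat) with
  | nil => rfl
  | cons j tl => simp

-- the get-hypothesis of the scan lemmas, horizontal case
lemma pv_hget_row (m : List (List String)) (y : Int)
    (hy0 : 0 ≤ y) (hy1 : y < (m.length : Int)) :
    ∀ i : Int, 0 ≤ i → i < (((PySem.List.pyGetD m y []).length : Nat) : Int) →
      pvGetCell m y i = some ((PySem.List.pyGetD m y []).getD i.toNat "") := by
  intro i hi0 hi1
  have hyn : y.toNat < m.length := by omega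
  have hlnq : PySem.List.pyGetD m y [] = m[y.toNat]?.getD [] := by
    rw [pv_line_row m y hy0 hy1]
    simp [List.getElem?_eq_getElem hyn]
  rw [hlnq] at hi1 ⊢
  rw [pv_getCell_eq m y i hy0 hy1 hi0 hi1]
  rw [List.getD_eq_getElem?_getD]

-- the get-hypothesis of the scan lemmas, vertical case
lemma pv_hget_col (m : List (List String)) (x : Int)
    (hx0 : 0 ≤ x) (hxw : x < ((m.headD []).length : Int))
    (hrect : ∀ r ∈ m, r.length = (m.headD []).length) :
    ∀ i : Int, 0 ≤ i → i < (((m.map (fun row => PySem.List.pyGetD row x "")).length : Nat) : Int) →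
      pvGetCell m i x = some ((m.map (fun row => PySem.List.pyGetD row x "")).getD i.toNat "") := by
  intro i hi0 hi1
  rw [List.length_map] at hi1
  have hin : i.toNat < m.length := by omega
  have hrowq : m[i.toNat]?.getD [] = m[i.toNat] := by
    simp [List.getElem?_eq_getElem hin]
  have hrlen : (m[i.toNat]?.getD []).length = (m.headD []).length := by
    rw [hrowq]; exact hrect _ (List.getElem_mem hin)
  rw [pv_getCell_eq m i x hi0 (by omega) hx0 (by rw [hrlen]; exact_mod_cast hxw)]
  have hmap : (m.map (fun row => PySem.List.pyGetD row x "")).getD i.toNat "" =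
      PySem.List.pyGetD (m[i.toNat]) x "" := by
    rw [List.getD_eq_getElem _ _ (by simpa using hin), List.getElem_map]
  rw [hmap, hrowq, PySem.List.pyGetD_of_nonneg _ _ hx0, List.getD_eq_getElem?_getD]

-- ===== VERDICT (by name: the statement is the Claim_ definition above) =====
theorem tankShoot_spec : Claim_equal_tankShoot := by
  intro d m x y _hdom hpre
  unfold Spec_tankShoot
  by_cases h1 : d = 1
  · subst h1
    obtain ⟨hy0, hy1, hx0, hxw, hrect⟩ := hpre (Or.inl rfl)
    have hlen : (PySem.List.pyGetD m y []).length = (m.headD []).length :=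
      pv_row_len m y _ hy0 hy1 hrect
    have hA := pv_scan_bwd m (PySem.List.pyGetD m y [])
        (pvGetCell m y) (fun i => pvSetCell m y i ".") (pvScanRow m y)
        rfl (fun i rest => rfl) (pv_hget_row m y hy0 hy1)
        x.toNat (by omega)
    rw [Int.toNat_of_nonneg hx0] at hA
    show tankShoot 1 m x y = _
    unfold tankShoot
    norm_num
    rw [hA, pv_alt_1 m x y hx0]
  · by_cases h2 : d = 2
    · subst h2
      obtain ⟨hy0, hy1, hx0, hxw, hrect⟩ := hpre (Or.inr (Or.inl rfl))
      have hlen : (PySem.List.pyGetD m y []).length = (m.headD []).length :=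
        pv_row_len m y _ hy0 hy1 hrect
      have hA := pv_scan_fwd m (PySem.List.pyGetD m y [])
          (pvGetCell m y) (fun i => pvSetCell m y i ".") (pvScanRow m y)
          rfl (fun i rest => rfl) (pv_hget_row m y hy0 hy1)
          (PySem.List.pyGetD m y []).length x.toNat (by omega)
      rw [Int.toNat_of_nonneg hx0, hlen] at hA
      show tankShoot 2 m x y = _
      unfold tankShoot
      norm_num
      simp only [List.headD_eq_head?_getD] at hA
      rw [hA, pv_alt_2 m x y hx0]
    · by_cases h3 : d = 3
      · subst h3
        obtain ⟨hy0, hy1, hx0, hxw, hrect⟩ := hpre (Or.inr (Or.inr (Or.inl rfl)))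
        have hA := pv_scan_bwd m (m.map (fun row => PySem.List.pyGetD row x ""))
            (fun i => pvGetCell m i x) (fun i => pvSetCell m i x ".") (pvScanCol m x)
            rfl (fun i rest => rfl) (pv_hget_col m x hx0 hxw hrect)
            y.toNat (by rw [List.length_map]; omega)
        rw [Int.toNat_of_nonneg hy0] at hA
        show tankShoot 3 m x y = _
        unfold tankShoot
        norm_num
        rw [hA, pv_alt_3 m x y hy0]
      · by_cases h4 : d = 4
        · subst h4
          obtain ⟨hy0, hy1, hx0, hxw, hrect⟩ := hpre (Or.inr (Or.inr (Or.inr rfl)))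
          have hA := pv_scan_fwd m (m.map (fun row => PySem.List.pyGetD row x ""))
              (fun i => pvGetCell m i x) (fun i => pvSetCell m i x ".") (pvScanCol m x)
              rfl (fun i rest => rfl) (pv_hget_col m x hx0 hxw hrect)
              (m.map (fun row => PySem.List.pyGetD row x "")).length y.toNat
              (by omega)
          rw [Int.toNat_of_nonneg hy0, List.length_map] at hA
          show tankShoot 4 m x y = _
          unfold tankShoot
          norm_num
          rw [hA, pv_alt_4 m x y hy0]
        · unfold tankShoot tankShoot_alt
          simp [h1, h2, h3, h4]
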